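-- pv_equiv track=rewrite | github.com/badis-ouaret/CryptoLab | Controller/Controllers.py | messageFormatDesChiffrement
-- ===== SOURCE A (Python) =====
-- def messageFormatDesChiffrement(message):
--     while len(message)%8 !=0:
--         message +=' '
--     messageTab=[]
--     messageBinTab = []
--     i=0
--     while i < len(message):
--         messageTab.append(message[i:i+8])
--         i +=8
--     for m in messageTab:
--         messageBin = "".join(bin(ord(caractere))[2:].zfill(8) for caractere in m)
--         messageBinTab.append(messageBin)
--     return messageBinTab
-- ===== SOURCE B (Python) =====
-- def messageFormatDesChiffrement(message):
--     message += ' ' * ((-len(message)) % 8)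
--     bits = ''.join(bin(ord(c))[2:].zfill(8) for c in message)
--     return [bits[i:i+64] for i in range(0, len(bits), 64)]
-- ===== Notes on version B (the rewrite author's own statement) =====
-- stated objective: simpler
-- what changed: Closed-form padding instead of a one-space-at-a-time while loop, then convert the whole padded message to one bitstring and slice it into 64-bit chunks, reversing A's chunk-then-convert order into convert-then-chunk.
import Mathlib
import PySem

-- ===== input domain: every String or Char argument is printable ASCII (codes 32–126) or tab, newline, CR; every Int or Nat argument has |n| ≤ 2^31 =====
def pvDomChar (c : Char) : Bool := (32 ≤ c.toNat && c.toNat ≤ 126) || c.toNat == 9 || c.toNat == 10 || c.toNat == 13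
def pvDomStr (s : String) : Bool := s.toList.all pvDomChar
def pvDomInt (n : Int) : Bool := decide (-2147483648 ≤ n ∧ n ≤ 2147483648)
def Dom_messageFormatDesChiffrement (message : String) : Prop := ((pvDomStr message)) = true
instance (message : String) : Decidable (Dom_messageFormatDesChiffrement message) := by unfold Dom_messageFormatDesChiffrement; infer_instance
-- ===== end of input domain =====

-- B replaces A's one-space-at-a-time padding loop by closed-form padding and reverses
-- A's chunk-then-binary-encode order into encode-the-whole-message-then-chunk (objective: simpler).


-- bin(ord(c))[2:].zfill(8) — the identical per-character expression both Pythons contain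
def pvEnc (c : Char) : List Char :=
  PySem.Chars.zfill (PySem.List.slice (PySem.Int.toBinChars0b (c.toNat : Int)) (some 2) none) 8

-- ===== PORT A =====
-- while len(message) % 8 != 0: message += ' '   (fuel only makes the loop total: 8 iterations always suffice)
def pvPadA (fuel : Nat) (cs : List Char) : List Char :=
  match fuel with
  | 0 => cs
  | fuel + 1 => if cs.length % 8 ≠ 0 then pvPadA fuel (cs ++ [' ']) else cs

-- while i < len(message): messageTab.append(message[i:i+8]); i += 8   (fuel = len + 1 iterations always suffice)
def pvChunkA (fuel : Nat) (cs : List Char) (i : Int) : List (List Char) :=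
  match fuel with
  | 0 => []
  | fuel + 1 =>
      if i < PySem.List.len cs then
        PySem.List.slice cs (some i) (some (i + 8)) :: pvChunkA fuel cs (i + 8)
      else []

def messageFormatDesChiffrement (message : String) : List String :=
  (pvChunkA ((pvPadA 8 message.toList).length + 1) (pvPadA 8 message.toList) 0).map
    (fun mm => String.mk (PySem.Chars.join [] (mm.map pvEnc)))

-- ===== PORT B =====
def messageFormatDesChiffrement_alt (message : String) : List String :=
  (PySem.List.pyRange 0
      (PySem.List.len (PySem.Chars.join []
        (((message.toList ++
            PySem.List.pyRepeat [' ']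
              (PySem.Int.mod (-(PySem.List.len message.toList)) 8))).map pvEnc))) 64).map
    (fun i => String.mk (PySem.List.slice
      (PySem.Chars.join []
        (((message.toList ++
            PySem.List.pyRepeat [' ']
              (PySem.Int.mod (-(PySem.List.len message.toList)) 8))).map pvEnc))
      (some i) (some (i + 64))))

-- ===== PRECONDITION & SPEC =====
def Spec_messageFormatDesChiffrement (message : String) (out : List String) : Prop := out = messageFormatDesChiffrement_alt message
instance (message : String) (out : List String) : Decidable (Spec_messageFormatDesChiffrement message out) := by unfold Spec_messageFormatDesChiffrement; infer_instance

-- ===== CLAIM (what is proved, stated in full; the proofs are below) =====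
def Claim_equal_messageFormatDesChiffrement : Prop := ∀ (message : String), Dom_messageFormatDesChiffrement message → Spec_messageFormatDesChiffrement message (messageFormatDesChiffrement message)

-- ===== LEMMAS AND PROOFS =====

theorem pv_join_nil (l : List (List Char)) : PySem.Chars.join [] l = l.flatten := by
  induction l with
  | nil => simp [PySem.Chars.join, List.intercalate]
  | cons x xs ih => cases xs <;> simp_all [PySem.Chars.join, List.intercalate, List.intersperse]

-- each domain character encodes to exactly 8 bits
theorem pvEnc_len (c : Char) (h : pvDomChar c = true) : (pvEnc c).length = 8 := by
  have h256 : c.toNat < 256 := by simp [pvDomChar] at h; omega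
  have hnn : ¬ ((c.toNat : Int) < 0) := by omega
  have hslice : PySem.List.slice (PySem.Int.toBinChars0b (c.toNat : Int)) (some 2) none
      = Nat.toDigits 2 c.toNat := by
    rw [show (some (2 : Int)) = some (((2 : Nat) : Int)) by norm_num,
        PySem.List.slice_from_natCast]
    simp [PySem.Int.toBinChars0b, hnn]
  have hd : (Nat.toDigits 2 c.toNat).length ≤ 8 :=
    Nat.toDigits_length 2 c.toNat 8 (by norm_num) (by norm_num; omega)
  rw [pvEnc, hslice, PySem.Chars.length_zfill]
  omega

theorem pv_flatten_len8 (x : List Char) (hall : ∀ c ∈ x, pvDomChar c = true) :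
    (x.map pvEnc).flatten.length = 8 * x.length := by
  induction x with
  | nil => simp
  | cons a t ih =>
      simp only [List.map_cons, List.flatten_cons, List.length_append, List.length_cons]
      rw [pvEnc_len a (hall a (by simp)), ih (fun c hc => hall c (by simp [hc]))]
      ring

-- A's padding in closed form
theorem pvPadA_fuel_eq (fuel : Nat) :
    ∀ cs : List Char, (8 - cs.length % 8) % 8 ≤ fuel →
      pvPadA fuel cs = cs ++ List.replicate ((8 - cs.length % 8) % 8) ' ' := by
  induction fuel with
  | zero =>
      intro cs hf
      have h0 : (8 - cs.length % 8) % 8 = 0 := by omega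
      rw [pvPadA, h0]
      simp
  | succ fuel ih =>
      intro cs hf
      rw [pvPadA]
      by_cases h : cs.length % 8 ≠ 0
      · rw [if_pos h, ih (cs ++ [' ']) (by simp; omega)]
        simp only [List.length_append, List.length_cons, List.length_nil]
        rw [List.append_assoc]
        congr 1
        have h1 : (8 - cs.length % 8) % 8 = (8 - (cs.length + 0 + 1) % 8) % 8 + 1 := by omega
        rw [h1]
        simp [List.replicate_succ]
      · rw [if_neg h]
        have h0 : (8 - cs.length % 8) % 8 = 0 := by omega
        simp [h0]

theorem pvPadA_eq (cs : List Char) :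
    pvPadA 8 cs = cs ++ List.replicate ((8 - cs.length % 8) % 8) ' ' :=
  pvPadA_fuel_eq 8 cs (by omega)

-- B's padding amount equals A's
theorem pv_pad_amount (n : Nat) :
    (PySem.Int.mod (-(n : Int)) 8).toNat = (8 - n % 8) % 8 := by
  rw [PySem.Int.mod_eq_emod_of_pos (by norm_num)]
  omega

-- A's chunk loop as structural recursion on the remaining suffix
def pvChunks (cs : List Char) : List (List Char) :=
  if cs = [] then [] else cs.take 8 :: pvChunks (cs.drop 8)
termination_by cs.length
decreasing_by rename_i h; cases cs with
  | nil => exact absurd rfl h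
  | cons a t => simp

theorem pvChunkA_eq (cs : List Char) (fuel : Nat) :
    ∀ i : Nat, cs.length ≤ i + 8 * fuel →
      pvChunkA fuel cs (i : Int) = pvChunks (cs.drop i) := by
  induction fuel with
  | zero =>
      intro i hf
      rw [pvChunkA, pvChunks.eq_def, if_pos (by simp only [List.drop_eq_nil_iff]; omega)]
  | succ fuel ih =>
      intro i hf
      rw [pvChunkA, pvChunks.eq_def]
      by_cases hlt : (i : Int) < PySem.List.len cs
      · have hi : i < cs.length := by
          rw [PySem.List.len_eq] at hlt; exact_mod_cast hlt
        rw [if_pos hlt, if_neg (by simp only [List.drop_eq_nil_iff]; omega)]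
        congr 1
        · rw [show ((i : Int) + 8) = ((i : Int) + ((8 : Nat) : Int)) by norm_num,
              PySem.List.slice_natCast_add cs i 8]
        · have hcast : ((i : Int) + 8) = ((i + 8 : Nat) : Int) := by push_cast; ring
          rw [hcast, ih (i + 8) (by omega), List.drop_drop]
      · have hi : cs.length ≤ i := by
          rw [PySem.List.len_eq] at hlt; omega
        rw [if_neg hlt, if_pos (by simp only [List.drop_eq_nil_iff]; omega)]

theorem pvChunkA_zero (cs : List Char) : pvChunkA (cs.length + 1) cs 0 = pvChunks cs := by
  have := pvChunkA_eq cs (cs.length + 1) 0 (by omega)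
  simpa using this

-- peeling one element off a step-64 range
theorem pyRange64_cons (a b : Int) (hab : a < b) :
    PySem.List.pyRange a b 64 = a :: PySem.List.pyRange (a + 64) b 64 := by
  rw [PySem.List.pyRange_of_pos a b (by norm_num),
      PySem.List.pyRange_of_pos (a + 64) b (by norm_num), if_pos hab]
  have hcount : ((b - a + 64 - 1) / 64).toNat
      = (if a + 64 < b then ((b - (a + 64) + 64 - 1) / 64).toNat else 0) + 1 := by
    split_ifs <;> omega
  rw [hcount, List.range_succ_eq_map]
  simp only [List.map_cons, List.map_map, Nat.cast_zero, mul_zero, add_zero]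
  congr 1
  apply List.map_congr_left
  intro k _
  simp only [Function.comp_apply, Nat.succ_eq_add_one]
  push_cast
  ring

-- shifting a step-64 range
theorem pyRange64_shift (L : Int) :
    PySem.List.pyRange 64 (64 + L) 64 = (PySem.List.pyRange 0 L 64).map (fun i => i + 64) := by
  rw [PySem.List.pyRange_of_pos 64 (64 + L) (by norm_num),
      PySem.List.pyRange_of_pos 0 L (by norm_num)]
  have h1 : 64 + L - 64 + 64 - 1 = L - 0 + 64 - 1 := by ring
  rw [h1]
  by_cases h0 : (0 : Int) < L
  · rw [if_pos (by omega), if_pos h0, List.map_map]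
    apply List.map_congr_left
    intro k _
    simp only [Function.comp_apply]
    ring
  · rw [if_neg (by omega), if_neg h0]
    simp

-- B's chunking of the bitstring, one 64-char block at a time
theorem pvChunksB_append (x y : List Char) (hx : x.length = 64) :
    (PySem.List.pyRange 0 (PySem.List.len (x ++ y)) 64).map
      (fun i => String.mk (PySem.List.slice (x ++ y) (some i) (some (i + 64))))
    = String.mk x ::
      (PySem.List.pyRange 0 (PySem.List.len y) 64).map
        (fun i => String.mk (PySem.List.slice y (some i) (some (i + 64)))) := by
  have hlen : PySem.List.len (x ++ y) = 64 + PySem.List.len y := by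
    simp only [PySem.List.len_eq, List.length_append, hx]
    push_cast
    ring
  have hpos : (0 : Int) < 64 + PySem.List.len y := by
    have : (0 : Int) ≤ PySem.List.len y := by rw [PySem.List.len_eq]; positivity
    omega
  rw [hlen, pyRange64_cons 0 (64 + PySem.List.len y) hpos,
      show (0 : Int) + 64 = 64 by norm_num, pyRange64_shift (PySem.List.len y),
      List.map_cons, List.map_map]
  congr 1
  · -- first block: (x ++ y)[0:64] = x
    congr 1
    rw [show (some ((0 : Int) + 64)) = some ((64 : Nat) : Int) by norm_num,
        show (some (0 : Int)) = some (((0 : Nat) : Int)) by norm_num,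
        PySem.List.slice_natCast]
    simp [List.take_left' hx]
  · apply List.map_congr_left
    intro i hi
    have h0i : (0 : Int) ≤ i :=
      ((PySem.List.mem_pyRange_iff_of_pos (by norm_num) i).mp hi).1
    obtain ⟨n, rfl⟩ : ∃ n : Nat, i = (n : Int) := ⟨i.toNat, (Int.toNat_of_nonneg h0i).symm⟩
    simp only [Function.comp_apply]
    congr 1
    rw [show ((n : Int) + 64) = ((n : Int) + ((64 : Nat) : Int)) by norm_num,
        PySem.List.slice_natCast_add y n 64,
        show ((n : Int) + ((64 : Nat) : Int)) = ((n + 64 : Nat) : Int) by push_cast; ring,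
        show (((n + 64 : Nat) : Int) + 64) = (((n + 64 : Nat) : Int) + ((64 : Nat) : Int)) by norm_num,
        PySem.List.slice_natCast_add (x ++ y) (n + 64) 64,
        List.drop_append]
    have hd : x.drop (n + 64) = [] := List.drop_eq_nil_of_le (by omega)
    rw [hd, hx]
    simp

-- main induction: chunk-then-encode = encode-then-chunk on a padded list
theorem pv_main (cs : List Char) (hdvd : cs.length % 8 = 0)
    (hall : ∀ c ∈ cs, pvDomChar c = true) :
    (pvChunks cs).map (fun mm => String.mk (mm.map pvEnc).flatten)
    = (PySem.List.pyRange 0 (PySem.List.len ((cs.map pvEnc).flatten)) 64).map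
        (fun i => String.mk (PySem.List.slice ((cs.map pvEnc).flatten) (some i) (some (i + 64)))) := by
  induction hn : cs.length using Nat.strong_induction_on generalizing cs with
  | _ n ih =>
    rw [pvChunks.eq_def]
    by_cases hnil : cs = []
    · subst hnil
      rw [if_pos rfl]
      have h0 : PySem.List.len ((List.map pvEnc ([] : List Char)).flatten) = 0 := by
        simp [PySem.List.len_eq]
      rw [h0, PySem.List.pyRange_of_pos 0 0 (by norm_num)]
      simp
    · rw [if_neg hnil]
      have hlen8 : 8 ≤ cs.length := by
        have := List.length_pos_iff.mpr hnil
        omega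
      have htk : (cs.take 8).length = 8 := by simp; omega
      have hflat : (cs.map pvEnc).flatten
          = ((cs.take 8).map pvEnc).flatten ++ ((cs.drop 8).map pvEnc).flatten := by
        rw [← List.flatten_append, ← List.map_append, List.take_append_drop]
      have hlen64 : ((cs.take 8).map pvEnc).flatten.length = 64 := by
        rw [pv_flatten_len8 _ (fun c hc => hall c (List.mem_of_mem_take hc)), htk]
      rw [hflat, pvChunksB_append _ _ hlen64, List.map_cons]
      congr 1
      exact ih (cs.drop 8).length (by simp; omega) (cs.drop 8)
        (by simp; omega) (fun c hc => hall c (List.mem_of_mem_drop hc)) rfl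

theorem pvPadA_all (cs : List Char) (hall : ∀ c ∈ cs, pvDomChar c = true) :
    ∀ c ∈ pvPadA 8 cs, pvDomChar c = true := by
  rw [pvPadA_eq]
  intro c hc
  rcases List.mem_append.mp hc with h | h
  · exact hall c h
  · rw [List.eq_of_mem_replicate h]; decide

-- ===== VERDICT (by name: the statement is the Claim_ definition above) =====
theorem messageFormatDesChiffrement_spec : Claim_equal_messageFormatDesChiffrement := by
  intro message hdom
  unfold Spec_messageFormatDesChiffrement messageFormatDesChiffrement messageFormatDesChiffrement_alt
  have hall : ∀ c ∈ message.toList, pvDomChar c = true := by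
    intro c hc
    have h := hdom
    unfold Dom_messageFormatDesChiffrement pvDomStr at h
    exact List.all_eq_true.mp h c hc
  have hpad : pvPadA 8 message.toList
      = message.toList ++
        PySem.List.pyRepeat [' '] (PySem.Int.mod (-(PySem.List.len message.toList)) 8) := by
    rw [pvPadA_eq, PySem.List.pyRepeat_singleton, PySem.List.len_eq, pv_pad_amount]
  have hpadlen : (pvPadA 8 message.toList).length % 8 = 0 := by
    rw [pvPadA_eq]
    simp only [List.length_append, List.length_replicate]
    omega
  have hpall := pvPadA_all message.toList hall
  simp only [pv_join_nil, ← hpad]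
  rw [pvChunkA_zero]
  exact pv_main (pvPadA 8 message.toList) hpadlen hpall
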